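-- pv_equiv track=rewrite | github.com/m1ndvortex/multi-tenant | backend/app/core/middleware.py | _path_matches_pattern
-- ===== SOURCE A (Python) =====
-- def _path_matches_pattern(path: str, pattern: str) -> bool:
--     """Check if path matches pattern with parameters"""
--     path_parts = path.split('/')
--     pattern_parts = pattern.split('/')
--
--     if len(path_parts) != len(pattern_parts):
--         return False
--
--     for path_part, pattern_part in zip(path_parts, pattern_parts):
--         if pattern_part.startswith('{') and pattern_part.endswith('}'):
--             # This is a path parameter, skip validation
--             continue
--         elif path_part != pattern_part:
--             return False
--
--     return True
-- ===== SOURCE B (Python) =====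
-- def _path_matches_pattern(path: str, pattern: str) -> bool:
--     """Check if path matches pattern with parameters.
--
--     Single simultaneous scan over both strings, one segment at a time:
--     no split into lists, no separate length check -- equal segment counts
--     fall out of consuming both strings in lockstep.
--     """
--     p, q = path, pattern
--     while True:
--         i = p.find('/')
--         j = q.find('/')
--         sp = p if i < 0 else p[:i]
--         sq = q if j < 0 else q[:j]
--         if not ((sq[:1] == '{' and sq[-1:] == '}') or sp == sq):
--             return False
--         if i < 0 and j < 0:
--             return True
--         if i < 0 or j < 0:
--             return False
--         p, q = p[i + 1:], q[j + 1:]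
-- ===== Notes on version B (the rewrite author's own statement) =====
-- stated objective: alternative
-- what changed: Replaces split-into-lists + length check + parallel zip loop by a single lockstep scan that peels one segment off each string per iteration, with equal segment counts emerging from simultaneous consumption.
import Mathlib
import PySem

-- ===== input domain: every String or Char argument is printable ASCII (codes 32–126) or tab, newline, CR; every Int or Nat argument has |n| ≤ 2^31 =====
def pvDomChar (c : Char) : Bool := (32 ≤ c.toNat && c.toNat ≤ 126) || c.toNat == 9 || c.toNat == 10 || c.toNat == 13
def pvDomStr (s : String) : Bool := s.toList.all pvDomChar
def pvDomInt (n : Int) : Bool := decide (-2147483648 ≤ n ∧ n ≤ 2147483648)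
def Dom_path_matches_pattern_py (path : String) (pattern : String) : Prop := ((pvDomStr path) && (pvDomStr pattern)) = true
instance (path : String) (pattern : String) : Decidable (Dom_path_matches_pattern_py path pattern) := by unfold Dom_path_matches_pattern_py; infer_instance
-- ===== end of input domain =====

-- B replaces A's split-into-lists + length check + zip loop by one lockstep
-- segment-by-segment scan over both strings (alternative decomposition, same cost).


-- ===== PORT A =====
-- 'pattern_part.startswith("{") and pattern_part.endswith("}")'
def pvWildA (seg : List Char) : Bool :=
  PySem.Chars.startswith seg ['{'] && PySem.Chars.endswith seg ['}']

-- the 'for path_part, pattern_part in zip(...)' loop with its early return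
def pvALoop : List (List Char × List Char) → Bool
  | [] => true
  | (pp, qp) :: rest =>
      if pvWildA qp then pvALoop rest
      else if pp ≠ qp then false
      else pvALoop rest

def path_matches_pattern_py (path : String) (pattern : String) : Bool :=
  let pathParts := PySem.Chars.splitOn path.toList ['/']
  let patternParts := PySem.Chars.splitOn pattern.toList ['/']
  if pathParts.length ≠ patternParts.length then false
  else pvALoop (pathParts.zip patternParts)

-- ===== PORT B =====
-- the while-loop of Source B: peel one '/'-segment off each string per step
-- (p[:i] / p[i+1:] around the first '/' rendered as takeWhile / tail of dropWhile)
def pvBGo (p q : List Char) : Bool :=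
  let sp := p.takeWhile (· ≠ '/')
  let sq := q.takeWhile (· ≠ '/')
  if (sq.head? == some '{' && sq.getLast? == some '}') || sp == sq then
    match h1 : p.dropWhile (· ≠ '/'), h2 : q.dropWhile (· ≠ '/') with
    | [], [] => true
    | _ :: p', _ :: q' => pvBGo p' q'
    | _, _ => false
  else false
termination_by p.length
decreasing_by
  have h := List.length_dropWhile_le (fun c => decide (c ≠ '/')) p
  rw [h1] at h
  simp at h; omega

def path_matches_pattern_py_alt (path : String) (pattern : String) : Bool :=
  pvBGo path.toList pattern.toList

-- ===== PRECONDITION & SPEC =====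
def Spec_path_matches_pattern_py (path : String) (pattern : String) (out : Bool) : Prop := out = path_matches_pattern_py_alt path pattern
instance (path : String) (pattern : String) (out : Bool) : Decidable (Spec_path_matches_pattern_py path pattern out) := by unfold Spec_path_matches_pattern_py; infer_instance

-- ===== CLAIM (what is proved, stated in full; the proofs are below) =====
def Claim_equal_path_matches_pattern_py : Prop := ∀ (path : String) (pattern : String), Dom_path_matches_pattern_py path pattern → Spec_path_matches_pattern_py path pattern (path_matches_pattern_py path pattern)

-- ===== LEMMAS AND PROOFS =====

-- reference shape of s.split('/'): accumulator-style segment splitter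
def pvSegs : List Char → List Char → List (List Char)
  | cur, [] => [cur.reverse]
  | cur, c :: rest => if c = '/' then cur.reverse :: pvSegs [] rest else pvSegs (c :: cur) rest

lemma pvGo_eq (fuel : Nat) (l cur : List Char) (acc : List (List Char))
    (h : l.length < fuel) :
    PySem.Chars.splitOn.go ['/'] fuel l cur acc = acc.reverse ++ pvSegs cur l := by
  induction fuel generalizing l cur acc with
  | zero => omega
  | succ n ih =>
    cases l with
    | nil => simp [PySem.Chars.splitOn.go, pvSegs]
    | cons c rest =>
      simp only [PySem.Chars.splitOn.go, List.isPrefixOf, pvSegs]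
      by_cases hc : c = '/'
      · subst hc
        simp only [beq_self_eq_true, Bool.true_and, if_true, List.length_cons,
          List.length_nil, List.drop_succ_cons, List.drop_zero]
        rw [ih rest [] (cur.reverse :: acc) (by simp at h ⊢; omega)]
        simp
      · have : (('/' : Char) == c) = false := by simp; exact fun he => hc he.symm
        simp only [this, Bool.false_and]
        rw [ih rest (c :: cur) acc (by simp at h ⊢; omega)]
        simp [hc]

lemma pvSplitOn_eq (s : List Char) :
    PySem.Chars.splitOn s ['/'] = pvSegs [] s := by
  unfold PySem.Chars.splitOn
  rw [pvGo_eq (s.length + 1) s [] [] (by omega)]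
  simp

lemma pvSegs_shape (cur l : List Char) :
    pvSegs cur l = (cur.reverse ++ l.takeWhile (· ≠ '/')) ::
      (match l.dropWhile (· ≠ '/') with
       | [] => []
       | _ :: r => pvSegs [] r) := by
  induction l generalizing cur with
  | nil => simp [pvSegs]
  | cons c rest ih =>
    by_cases hc : c = '/'
    · subst hc; simp [pvSegs, List.takeWhile, List.dropWhile]
    · simp only [pvSegs, if_neg hc]
      rw [ih (c :: cur)]
      simp [List.takeWhile, List.dropWhile, hc]

lemma pvStarts_single (s : List Char) (c : Char) :
    PySem.Chars.startswith s [c] = (s.head? == some c) := by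
  cases s with
  | nil => rfl
  | cons d r =>
    simp [PySem.Chars.startswith, List.isPrefixOf]
    exact eq_comm

lemma pvWild_eq (sq : List Char) :
    pvWildA sq = (sq.head? == some '{' && sq.getLast? == some '}') := by
  unfold pvWildA
  have h2 : PySem.Chars.endswith sq ['}'] = (sq.getLast? == some '}') := by
    have : PySem.Chars.endswith sq ['}'] = PySem.Chars.startswith sq.reverse ['}'] := rfl
    rw [this, pvStarts_single, List.head?_reverse]
  rw [pvStarts_single, h2]

lemma pvBeqSucc (a b : Nat) : (a + 1 == b + 1) = (a == b) := by
  by_cases h : a = b <;> simp [h]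

lemma pvSegs_len_pos (l : List Char) : 0 < (pvSegs [] l).length := by
  rw [pvSegs_shape]; simp

lemma pvALoop_cons_ok (tp tq : List Char) (rest : List (List Char × List Char))
    (hok : (tq.head? == some '{' && tq.getLast? == some '}' || tp == tq) = true) :
    pvALoop ((tp, tq) :: rest) = pvALoop rest := by
  rcases Bool.or_eq_true_iff.mp hok with hw | he
  · simp [pvALoop, pvWild_eq, hw]
  · rw [eq_of_beq he]; simp [pvALoop]

lemma pvMain (p q : List Char) :
    pvBGo p q = (((pvSegs [] p).length == (pvSegs [] q).length) &&
      pvALoop ((pvSegs [] p).zip (pvSegs [] q))) := by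
  fun_induction pvBGo p q with
  | case1 p q sp sq hok h1 h2 =>
    rw [pvSegs_shape [] p, pvSegs_shape [] q, h1, h2]
    simp only [sp, sq] at hok
    simp only [List.nil_append, List.reverse_nil, List.zip_cons_cons, List.zip_nil_right]
    rw [pvALoop_cons_ok _ _ _ hok]
    rfl
  | case2 p q sp sq hok c p' d q' h1 h2 ih =>
    rw [pvSegs_shape [] p, pvSegs_shape [] q, h1, h2]
    simp only [sp, sq] at hok
    simp only [List.nil_append, List.reverse_nil, List.zip_cons_cons, List.length_cons]
    rw [pvALoop_cons_ok _ _ _ hok, pvBeqSucc, ih]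
  | case3 p q sp sq hok f g =>
    cases hdp : p.dropWhile (· ≠ '/') with
    | nil =>
      cases hdq : q.dropWhile (· ≠ '/') with
      | nil => exact (f hdp hdq).elim
      | cons d q' =>
        rw [pvSegs_shape [] p, pvSegs_shape [] q, hdp, hdq]
        have := pvSegs_len_pos q'
        simp only [List.length_nil, List.length_cons]
        have hb : ((0 + 1 : Nat) == (pvSegs [] q').length + 1) = false := by
          rw [pvBeqSucc]; exact beq_eq_false_iff_ne.mpr (by omega)
        rw [hb, Bool.false_and]
    | cons c p' =>
      cases hdq : q.dropWhile (· ≠ '/') with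
      | nil =>
        rw [pvSegs_shape [] p, pvSegs_shape [] q, hdp, hdq]
        have := pvSegs_len_pos p'
        simp only [List.length_nil, List.length_cons]
        have hb : ((pvSegs [] p').length + 1 == (0 + 1 : Nat)) = false := by
          rw [pvBeqSucc]; exact beq_eq_false_iff_ne.mpr (by omega)
        rw [hb, Bool.false_and]
      | cons d q' => exact (g c p' d q' hdp hdq).elim
  | case4 p q sp sq hok =>
    rw [pvSegs_shape [] p, pvSegs_shape [] q]
    simp only [sp, sq, Bool.or_eq_true, not_or, Bool.not_eq_true] at hok
    simp only [List.nil_append, List.reverse_nil, List.zip_cons_cons]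
    have hne : ¬ (List.takeWhile (fun x => decide (x ≠ '/')) p
        = List.takeWhile (fun x => decide (x ≠ '/')) q) := by
      intro h
      rw [h] at hok
      exact absurd hok.2 (by simp)
    have hA : ∀ rest, pvALoop ((List.takeWhile (fun x => decide (x ≠ '/')) p,
        List.takeWhile (fun x => decide (x ≠ '/')) q) :: rest) = false := by
      intro rest
      simp only [pvALoop]
      rw [pvWild_eq, if_neg (ne_true_of_eq_false hok.1), if_pos hne]
    rw [hA, Bool.and_false]

-- ===== VERDICT (by name: the statement is the Claim_ definition above) =====
theorem path_matches_pattern_py_spec : Claim_equal_path_matches_pattern_py := by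
  intro path pattern _
  unfold Spec_path_matches_pattern_py path_matches_pattern_py path_matches_pattern_py_alt
  rw [pvSplitOn_eq, pvSplitOn_eq, pvMain]
  by_cases h : (pvSegs [] path.toList).length = (pvSegs [] pattern.toList).length
  · simp [h]
  · simp [h]
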